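-- pv_equiv track=rewrite | github.com/cmsigrist/OoO470 | Stages.py | fetch_and_decode
-- ===== SOURCE A (Python) =====
-- MAX_COMMIT = 4
--
-- def fetch_and_decode(PC, DIR, instructions, exception_flag):
--     # if Commit set the exception flag then change PC
--     if exception_flag:
--         # ask about this value
--         PC = 0x10000
--         DIR = []
--     else:
--         # can fetch up to 4 instructions and only if there are still instructions
--         while len(DIR) < MAX_COMMIT and PC < len(instructions):
--             # check if enough space in physical registers, in the Active List,
--             # and in the IQ.
--             DIR.append(PC)  # Fetch new instructions
--             PC += 1
--     return PC, DIR
-- ===== SOURCE B (Python) =====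
-- MAX_COMMIT = 4
--
-- def fetch_and_decode(PC, DIR, instructions, exception_flag):
--     if exception_flag:
--         PC = 0x10000
--         DIR = []
--     else:
--         n = max(0, min(MAX_COMMIT - len(DIR), len(instructions) - PC))
--         DIR.extend(range(PC, PC + n))
--         PC += n
--     return PC, DIR
-- ===== Notes on version B (the rewrite author's own statement) =====
-- stated objective: simpler
-- what changed: Replaces A's one-instruction-at-a-time while loop with a closed-form fetch count n = max(0, min(MAX_COMMIT - len(DIR), len(instructions) - PC)) and a single bulk DIR.extend(range(PC, PC + n)); DIR is still mutated in place.
import Mathlib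
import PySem

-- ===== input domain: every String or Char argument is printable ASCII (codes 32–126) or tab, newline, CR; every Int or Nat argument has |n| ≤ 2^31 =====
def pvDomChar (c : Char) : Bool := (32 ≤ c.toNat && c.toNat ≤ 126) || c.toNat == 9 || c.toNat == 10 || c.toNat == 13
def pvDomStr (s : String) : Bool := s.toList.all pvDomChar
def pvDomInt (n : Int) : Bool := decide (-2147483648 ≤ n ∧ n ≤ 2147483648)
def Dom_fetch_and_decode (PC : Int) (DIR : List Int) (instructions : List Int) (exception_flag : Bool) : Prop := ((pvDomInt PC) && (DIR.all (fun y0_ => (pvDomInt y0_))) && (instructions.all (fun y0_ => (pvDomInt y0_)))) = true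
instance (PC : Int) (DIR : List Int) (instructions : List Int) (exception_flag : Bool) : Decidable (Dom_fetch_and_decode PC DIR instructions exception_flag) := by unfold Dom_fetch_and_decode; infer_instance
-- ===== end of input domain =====

-- B replaces A's one-at-a-time fetch loop with a closed-form fetch count and a bulk range-extend (objective: simpler).
-- A mutates DIR in place (append); B preserves this via extend. The equivalence proved is about the return value.


-- ===== PORT A =====
-- literal port of A's while loop: append PC, increment PC, while len(DIR) < 4 and PC < len(instructions)
def fetchLoop (PC : Int) (DIR : List Int) (instructions : List Int) : Int × List Int :=
  if DIR.length < 4 ∧ PC < (instructions.length : Int) then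
    fetchLoop (PC + 1) (DIR ++ [PC]) instructions
  else (PC, DIR)
termination_by 4 - DIR.length
decreasing_by simp; omega

def fetch_and_decode (PC : Int) (DIR : List Int) (instructions : List Int) (exception_flag : Bool) : Int × List Int :=
  if exception_flag then (0x10000, [])
  else fetchLoop PC DIR instructions

-- ===== PORT B =====
def fetch_and_decode_alt (PC : Int) (DIR : List Int) (instructions : List Int) (exception_flag : Bool) : Int × List Int :=
  if exception_flag then (0x10000, [])
  else
    let n := max 0 (min (4 - (DIR.length : Int)) ((instructions.length : Int) - PC))
    (PC + n, DIR ++ PySem.List.pyRange PC (PC + n) 1)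

-- ===== PRECONDITION & SPEC =====
def Spec_fetch_and_decode (PC : Int) (DIR : List Int) (instructions : List Int) (exception_flag : Bool) (out : Int × List Int) : Prop := out = fetch_and_decode_alt PC DIR instructions exception_flag
instance (PC : Int) (DIR : List Int) (instructions : List Int) (exception_flag : Bool) (out : Int × List Int) : Decidable (Spec_fetch_and_decode PC DIR instructions exception_flag out) := by unfold Spec_fetch_and_decode; infer_instance

-- ===== CLAIM (what is proved, stated in full; the proofs are below) =====
def Claim_equal_fetch_and_decode : Prop := ∀ (PC : Int) (DIR : List Int) (instructions : List Int) (exception_flag : Bool), Dom_fetch_and_decode PC DIR instructions exception_flag → Spec_fetch_and_decode PC DIR instructions exception_flag (fetch_and_decode PC DIR instructions exception_flag)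

-- ===== LEMMAS AND PROOFS =====

theorem fetchLoop_closed (k : Nat) (PC : Int) (DIR : List Int) (instructions : List Int)
    (hk : DIR.length + k = 4 ∨ (4 ≤ DIR.length ∧ k = 0)) :
    fetchLoop PC DIR instructions =
      (PC + max 0 (min (4 - (DIR.length : Int)) ((instructions.length : Int) - PC)),
       DIR ++ PySem.List.pyRange PC (PC + max 0 (min (4 - (DIR.length : Int)) ((instructions.length : Int) - PC))) 1) := by
  induction k generalizing PC DIR with
  | zero =>
    rw [fetchLoop]
    have h4 : 4 ≤ DIR.length := by omega
    have hn : max 0 (min (4 - (DIR.length : Int)) ((instructions.length : Int) - PC)) = 0 := by omega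
    simp only [hn]
    rw [if_neg (by omega)]
    rw [PySem.List.pyRange_one_eq_nil (by omega : PC + 0 ≤ PC)]; simp
  | succ m ih =>
    rw [fetchLoop]
    by_cases hc : DIR.length < 4 ∧ PC < (instructions.length : Int)
    · rw [if_pos hc]
      rw [ih (PC + 1) (DIR ++ [PC]) (by simp; omega)]
      set n := max 0 (min (4 - (DIR.length : Int)) ((instructions.length : Int) - PC)) with hn
      have hlen : ((DIR ++ [PC]).length : Int) = (DIR.length : Int) + 1 := by simp
      have hn' : max 0 (min (4 - ((DIR ++ [PC]).length : Int)) ((instructions.length : Int) - (PC + 1))) = n - 1 := by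
        rw [hlen]; omega
      rw [hn']
      have hpc : PC + 1 + (n - 1) = PC + n := by ring
      have hpos : 1 ≤ n := by omega
      rw [hpc, List.append_assoc, PySem.List.pyRange_one_cons (by omega : PC < PC + n)]
      simp
    · rw [if_neg hc]
      have hn : max 0 (min (4 - (DIR.length : Int)) ((instructions.length : Int) - PC)) = 0 := by omega
      simp only [hn]
      rw [PySem.List.pyRange_one_eq_nil (by omega : PC + 0 ≤ PC)]; simp

-- ===== VERDICT (by name: the statement is the Claim_ definition above) =====
theorem fetch_and_decode_spec : Claim_equal_fetch_and_decode := by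
  intro PC DIR instructions exception_flag _
  unfold Spec_fetch_and_decode fetch_and_decode fetch_and_decode_alt
  by_cases he : exception_flag
  · simp [he]
  · simp only [he, if_false, Bool.false_eq_true]
    by_cases h4 : DIR.length ≤ 4
    · exact fetchLoop_closed (4 - DIR.length) PC DIR instructions (by omega)
    · exact fetchLoop_closed 0 PC DIR instructions (by omega)
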